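-- pv_equiv track=rewrite | github.com/thechnotom/comp3106_project | Graph.py | convert_population_record_depr
-- ===== SOURCE A (Python) =====
-- def convert_population_record_depr (population_record):
--     result = {}
--     # walk through all recorded time steps
--     for record in population_record:
--         # walk through all species noted at current time step
--         for species in population_record[record]:
--             if (species not in result):
--                 result[species] = {"step" : [], "population" : []}
--             result[species]["step"].append(record)
--             result[species]["population"].append(population_record[record][species])
--     return result
-- ===== SOURCE B (Python) =====
-- def convert_population_record_depr(population_record):
--     # species-outer transposition: collect species in first-appearance order,
--     # then gather each species' steps/populations by one scan over the records
--     species_order = dict.fromkeys(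
--         sp for inner in population_record.values() for sp in inner
--     )
--     return {
--         sp: {
--             "step": [rec for rec, inner in population_record.items() if sp in inner],
--             "population": [inner[sp] for inner in population_record.values() if sp in inner],
--         }
--         for sp in species_order
--     }
-- ===== Notes on version B (the rewrite author's own statement) =====
-- stated objective: alternative
-- what changed: B transposes the loop order: it first collects the species key order with dict.fromkeys over all records, then builds each species' step/population lists by per-species comprehensions over the records, instead of A's records-outer incremental mutation of a dict of dicts.
import Mathlib
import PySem

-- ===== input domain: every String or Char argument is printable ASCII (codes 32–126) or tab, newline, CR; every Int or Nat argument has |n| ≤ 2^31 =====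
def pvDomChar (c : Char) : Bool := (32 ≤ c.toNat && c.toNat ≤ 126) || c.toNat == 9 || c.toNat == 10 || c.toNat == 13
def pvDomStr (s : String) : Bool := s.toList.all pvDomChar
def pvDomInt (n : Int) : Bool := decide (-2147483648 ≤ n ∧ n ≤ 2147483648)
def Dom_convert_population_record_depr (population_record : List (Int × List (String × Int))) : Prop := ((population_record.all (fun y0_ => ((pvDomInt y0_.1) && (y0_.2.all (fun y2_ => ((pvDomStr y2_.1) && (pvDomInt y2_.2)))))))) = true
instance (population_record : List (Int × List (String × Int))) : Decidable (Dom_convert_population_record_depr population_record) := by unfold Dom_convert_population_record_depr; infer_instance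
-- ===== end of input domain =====

-- B transposes species-outer: ordered species list first, then per-species scans of the records (alternative decomposition; not claimed faster).


-- ===== PORT A =====
-- records-outer double loop building a dict of dicts; `population_record[record][species]`
-- is ported as the two dict lookups (exact for any input representing a Python dict, i.e. under Pre_).
def convert_population_record_depr (population_record : List (Int × List (String × Int))) : List (String × List (String × List Int)) :=
  let result : PySem.Dict String (PySem.Dict String (List Int)) :=
    population_record.foldl (fun result record =>
      record.2.foldl (fun result species =>
        let result :=
          if result.contains species.1 then result
          else result.insert species.1 (PySem.Dict.mk [("step", ([] : List Int)), ("population", ([] : List Int))])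
        let inner := result.getD species.1 (PySem.Dict.mk [])
        let inner := inner.modify "step" [] (fun l => l ++ [record.1])
        let inner := inner.modify "population" [] (fun l =>
          l ++ [(PySem.Dict.mk ((PySem.Dict.mk population_record).getD record.1 [])).getD species.1 0])
        result.insert species.1 inner) result) (PySem.Dict.mk [])
  result.items.map (fun p => (p.1, p.2.items))

-- ===== PORT B =====
-- species-outer: ordered dedup of all species (dict.fromkeys), then one comprehension-style
-- scan of the records per species; `inner[sp]` is guarded by the contains test, so getD is exact.
def convert_population_record_depr_alt (population_record : List (Int × List (String × Int))) : List (String × List (String × List Int)) :=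
  let species_order := PySem.List.dedup (population_record.flatMap (fun r => r.2.map (fun sv => sv.1)))
  species_order.map (fun sp =>
    (sp, [("step", (population_record.filter (fun r => (PySem.Dict.mk r.2).contains sp)).map (fun r => r.1)),
          ("population", (population_record.filter (fun r => (PySem.Dict.mk r.2).contains sp)).map (fun r => (PySem.Dict.mk r.2).getD sp 0))]))

-- ===== PRECONDITION & SPEC =====
-- Pre_ excludes association lists with duplicate keys (outer or inner): those do not
-- represent any Python dict, so A's Python behaviour is undefined there (its argument is a dict).
def Pre_convert_population_record_depr (population_record : List (Int × List (String × Int))) : Prop :=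
  (population_record.map (fun r => r.1)).Nodup ∧ ∀ r ∈ population_record, (r.2.map (fun sv => sv.1)).Nodup
instance (population_record : List (Int × List (String × Int))) : Decidable (Pre_convert_population_record_depr population_record) := by unfold Pre_convert_population_record_depr; infer_instance

def pvWitness_convert_population_record_depr : (List (Int × List (String × Int))) := [(0, [("a", 1), ("b", 2)]), (1, [("a", 3)])]

def Spec_convert_population_record_depr (population_record : List (Int × List (String × Int))) (out : List (String × List (String × List Int))) : Prop := out = convert_population_record_depr_alt population_record
instance (population_record : List (Int × List (String × Int))) (out : List (String × List (String × List Int))) : Decidable (Spec_convert_population_record_depr population_record out) := by unfold Spec_convert_population_record_depr; infer_instance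

-- ===== CLAIM (what is proved, stated in full; the proofs are below) =====
def Claim_equal_convert_population_record_depr : Prop := ∀ (population_record : List (Int × List (String × Int))), Dom_convert_population_record_depr population_record → Pre_convert_population_record_depr population_record → Spec_convert_population_record_depr population_record (convert_population_record_depr population_record)

-- ===== LEMMAS AND PROOFS =====

/-- The inner record `{"step": [], "population": []}` used as a read-off default. -/
def pvInner0 : PySem.Dict String (List Int) := PySem.Dict.mk [("step", []), ("population", [])]

/-- A's loop body on one flattened (record-key, species, value) triple. -/
def pvStep (res : PySem.Dict String (PySem.Dict String (List Int))) (q : Int × String × Int) :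
    PySem.Dict String (PySem.Dict String (List Int)) :=
  let res :=
    if res.contains q.2.1 then res
    else res.insert q.2.1 (PySem.Dict.mk [("step", ([] : List Int)), ("population", ([] : List Int))])
  let inner := res.getD q.2.1 (PySem.Dict.mk [])
  let inner := inner.modify "step" [] (fun l => l ++ [q.1])
  let inner := inner.modify "population" [] (fun l => l ++ [q.2.2])
  res.insert q.2.1 inner

/-- Every inner value stored by A's loop has the literal two-key shape. -/
def pvGood (res : PySem.Dict String (PySem.Dict String (List Int))) : Prop :=
  ∀ k v, res.get? k = some v → ∃ s p, v = PySem.Dict.mk [("step", s), ("population", p)]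

lemma pvStep_eq (res : PySem.Dict String (PySem.Dict String (List Int))) (q : Int × String × Int)
    (s p : List Int) (h : res.getD q.2.1 pvInner0 = PySem.Dict.mk [("step", s), ("population", p)]) :
    pvStep res q = res.insert q.2.1 (PySem.Dict.mk [("step", s ++ [q.1]), ("population", p ++ [q.2.2])]) := by
  simp only [pvStep]
  by_cases hc : res.contains q.2.1
  · rw [if_pos hc]
    have hex : ∃ v, res.get? q.2.1 = some v := by
      have := PySem.Dict.contains_eq_isSome_get? (d := res) (k := q.2.1)
      rw [hc] at this
      exact Option.isSome_iff_exists.mp this.symm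
    obtain ⟨v, hv⟩ := hex
    have hgv : res.getD q.2.1 (PySem.Dict.mk []) = PySem.Dict.mk [("step", s), ("population", p)] := by
      simp [PySem.Dict.getD, hv] at h ⊢; exact h
    rw [hgv]
    congr 1
  · rw [if_neg hc]
    have hget : res.get? q.2.1 = none := by
      have := PySem.Dict.contains_eq_isSome_get? (d := res) (k := q.2.1)
      rw [Bool.not_eq_true] at hc
      rw [hc] at this
      cases hg : res.get? q.2.1 with
      | none => rfl
      | some v => rw [hg] at this; simp at this
    have h0 : res.getD q.2.1 pvInner0 = pvInner0 := by simp [PySem.Dict.getD, hget]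
    rw [h0] at h
    have hsp : s = [] ∧ p = [] := by
      have := congrArg PySem.Dict.items h
      simpa [pvInner0, eq_comm] using this
    obtain ⟨rfl, rfl⟩ := hsp
    rw [PySem.Dict.getD_insert_self]
    rw [PySem.Dict.insert_insert_self]
    congr 1

lemma pvGoodD (res : PySem.Dict String (PySem.Dict String (List Int))) (hg : pvGood res) (k : String) :
    ∃ s p, res.getD k pvInner0 = PySem.Dict.mk [("step", s), ("population", p)] := by
  cases hv : res.get? k with
  | none => exact ⟨[], [], by simp [PySem.Dict.getD, hv, pvInner0]⟩
  | some v =>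
    obtain ⟨s, p, rfl⟩ := hg k v hv
    exact ⟨s, p, by simp [PySem.Dict.getD, hv]⟩

lemma pvKeys_insert_set_add (res : PySem.Dict String (PySem.Dict String (List Int))) (k : String)
    (v : PySem.Dict String (List Int)) :
    (res.insert k v).keys = PySem.Set.add res.keys k := by
  by_cases hc : res.contains k
  · rw [PySem.Dict.keys_insert_of_contains _ _ hc, PySem.Set.add, if_pos]
    rw [PySem.Dict.contains_eq_decide_mem_keys] at hc
    simpa using hc
  · rw [Bool.not_eq_true] at hc
    rw [PySem.Dict.keys_insert_of_not_contains _ _ hc, PySem.Set.add, if_neg]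
    rw [PySem.Dict.contains_eq_decide_mem_keys] at hc
    simpa using hc

/-- Invariant of A's loop over the flattened (record, species, value) triples:
keys in first-appearance order, and each species' two lists read off by filters. -/
lemma pvFold_invariant (ps : List (Int × String × Int))
    (res : PySem.Dict String (PySem.Dict String (List Int)))
    (hnd : res.keys.Nodup) (hg : pvGood res) :
    (ps.foldl pvStep res).keys = PySem.Set.update res.keys (ps.map (fun q => q.2.1))
    ∧ (ps.foldl pvStep res).keys.Nodup
    ∧ ∀ k, (ps.foldl pvStep res).getD k pvInner0 =
        PySem.Dict.mk [("step", (res.getD k pvInner0).getD "step" [] ++ (ps.filter (fun q => q.2.1 == k)).map (fun q => q.1)),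
                       ("population", (res.getD k pvInner0).getD "population" [] ++ (ps.filter (fun q => q.2.1 == k)).map (fun q => q.2.2))] := by
  induction ps generalizing res with
  | nil =>
    refine ⟨rfl, hnd, fun k => ?_⟩
    obtain ⟨s, p, h⟩ := pvGoodD res hg k
    simp only [List.foldl_nil, List.filter_nil, List.map_nil, List.append_nil]
    rw [h]
    simp [PySem.Dict.getD, PySem.Dict.get?]
  | cons q rest ih =>
    obtain ⟨s, p, h⟩ := pvGoodD res hg q.2.1
    have hstep := pvStep_eq res q s p h
    set res' := res.insert q.2.1 (PySem.Dict.mk [("step", s ++ [q.1]), ("population", p ++ [q.2.2])]) with hres'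
    have hnd' : res'.keys.Nodup := PySem.Dict.nodup_keys_insert _ _ _ hnd
    have hg' : pvGood res' := by
      intro k v hv
      by_cases hk : k = q.2.1
      · subst hk; rw [PySem.Dict.get?_insert_self] at hv
        exact ⟨s ++ [q.1], p ++ [q.2.2], by injection hv with h'; exact h'.symm⟩
      · rw [PySem.Dict.get?_insert_of_ne _ _ hk] at hv
        exact hg k v hv
    obtain ⟨ihk, ihnd, ihd⟩ := ih res' hnd' hg'
    refine ⟨?_, by simpa [List.foldl_cons, hstep] using ihnd, fun k => ?_⟩
    · rw [List.foldl_cons, hstep, ihk, pvKeys_insert_set_add]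
      rfl
    · rw [List.foldl_cons, hstep]
      have := ihd k
      rw [hres'] at this
      rw [this]
      by_cases hk : k = q.2.1
      · subst hk
        rw [PySem.Dict.getD_insert_self, h]
        simp [PySem.Dict.getD, PySem.Dict.get?]
      · rw [PySem.Dict.getD_insert_of_ne _ _ _ hk]
        have hne : (q.2.1 == k) = false := by simpa using Ne.symm hk
        simp [hne]

/-- A nested fold over records/species is the fold over the flattened triple list. -/
lemma pvFoldl_flatMap {δ : Type} (pr : List (Int × List (String × Int)))
    (g : δ → Int × String × Int → δ) (init : δ) :
    (pr.flatMap (fun r => r.2.map (fun sv => (r.1, sv.1, sv.2)))).foldl g init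
    = pr.foldl (fun res r => r.2.foldl (fun res sv => g res (r.1, sv.1, sv.2)) res) init := by
  induction pr generalizing init with
  | nil => rfl
  | cons r t ih => simp [List.flatMap_cons, List.foldl_append, List.foldl_map, ih]

/-- In a duplicate-free association list, filtering by key yields the looked-up pair. -/
lemma pvAssoc_filter (k : String) (l : List (String × Int)) (h : (l.map (fun sv => sv.1)).Nodup) :
    l.filter (fun sv => sv.1 == k)
    = match (PySem.Dict.mk l).get? k with
      | some v => [(k, v)]
      | none => [] := by
  induction l with
  | nil => rfl
  | cons a t ih =>
    simp only [List.map_cons, List.nodup_cons] at h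
    by_cases hk : a.1 = k
    · have hb : (a.1 == k) = true := by simpa using hk
      have hnone : t.filter (fun sv => sv.1 == k) = [] := by
        apply List.filter_eq_nil_iff.mpr
        intro sv hsv hc
        have hsvk : sv.1 = k := by simpa using hc
        exact h.1 (hk ▸ hsvk ▸ List.mem_map_of_mem hsv)
      rw [List.filter_cons_of_pos (by simpa using hb), hnone]
      simp [PySem.Dict.get?, ← hk]
    · have hb : (a.1 == k) = false := by simpa using hk
      rw [List.filter_cons_of_neg (by simp [hb]), ih h.2]
      simp [PySem.Dict.get?, hb]

/-- The per-species filter of the flattened triples is B's per-species record scan. -/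
lemma pvFlat_filter (k : String) (pr : List (Int × List (String × Int)))
    (hin : ∀ r ∈ pr, (r.2.map (fun sv => sv.1)).Nodup) :
    (pr.flatMap (fun r => r.2.map (fun sv => (r.1, sv.1, sv.2)))).filter (fun q => q.2.1 == k)
    = (pr.filter (fun r => (PySem.Dict.mk r.2).contains k)).map
        (fun r => (r.1, k, (PySem.Dict.mk r.2).getD k 0)) := by
  induction pr with
  | nil => rfl
  | cons r t ih =>
    rw [List.flatMap_cons, List.filter_append, ih (fun x hx => hin x (List.mem_cons_of_mem _ hx))]
    have h1 : (r.2.map (fun sv => (r.1, sv.1, sv.2))).filter (fun q => q.2.1 == k)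
        = (r.2.filter (fun sv => sv.1 == k)).map (fun sv => (r.1, sv.1, sv.2)) := by
      rw [List.filter_map]; rfl
    rw [h1, pvAssoc_filter k r.2 (hin r (List.mem_cons_self))]
    cases hv : (PySem.Dict.mk r.2).get? k with
    | none =>
      have hc : (PySem.Dict.mk r.2).contains k = false := by
        rw [PySem.Dict.contains_eq_isSome_get?, hv]; rfl
      rw [List.filter_cons_of_neg (by simp [hc]), List.map_nil, List.nil_append]
    | some v =>
      have hc : (PySem.Dict.mk r.2).contains k = true := by
        rw [PySem.Dict.contains_eq_isSome_get?, hv]; rfl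
      have hd : (PySem.Dict.mk r.2).getD k 0 = v := by simp [PySem.Dict.getD, hv]
      rw [List.filter_cons_of_pos (by simp [hc])]
      simp [hd]

lemma pvMain (pr : List (Int × List (String × Int)))
    (hout : (pr.map (fun r => r.1)).Nodup) (hin : ∀ r ∈ pr, (r.2.map (fun sv => sv.1)).Nodup) :
    convert_population_record_depr pr = convert_population_record_depr_alt pr := by
  have hlookup : ∀ r ∈ pr, ∀ sv ∈ r.2,
      (PySem.Dict.mk ((PySem.Dict.mk pr).getD r.1 [])).getD sv.1 0 = sv.2 := by
    intro r hr sv hsv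
    have h1 : (PySem.Dict.mk pr).getD r.1 [] = r.2 :=
      PySem.Dict.getD_of_mem_items _ (by simpa using hr) (by simpa using hout) _
    rw [h1]
    exact PySem.Dict.getD_of_mem_items _ (by simpa using hsv) (by simpa using hin r hr) _
  have hA : convert_population_record_depr pr
      = (pr.foldl (fun res r => r.2.foldl (fun res sv => pvStep res (r.1, sv.1, sv.2)) res)
          (PySem.Dict.mk [])).items.map (fun p => (p.1, p.2.items)) := by
    simp only [convert_population_record_depr]
    congr 1
    congr 1
    apply PySem.List.foldl_congr_mem
    intro acc r hr
    apply PySem.List.foldl_congr_mem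
    intro acc2 sv hsv
    rw [hlookup r hr sv hsv]
    rfl
  rw [hA, ← pvFoldl_flatMap]
  obtain ⟨hk, hnd, hd⟩ := pvFold_invariant
    (pr.flatMap (fun r => r.2.map (fun sv => (r.1, sv.1, sv.2)))) (PySem.Dict.mk [])
    (by simp [PySem.Dict.keys]) (by intro k v hv; simp [PySem.Dict.get?] at hv)
  rw [PySem.Dict.items_eq_map_keys _ hnd pvInner0, List.map_map, hk]
  have hkeys : PySem.Set.update (PySem.Dict.mk ([] : List (String × PySem.Dict String (List Int)))).keys
      ((pr.flatMap (fun r => r.2.map (fun sv => (r.1, sv.1, sv.2)))).map (fun q => q.2.1))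
      = PySem.List.dedup (pr.flatMap (fun r => r.2.map (fun sv => sv.1))) := by
    simp only [PySem.List.dedup, PySem.Set.update, PySem.Set.ofList, List.map_flatMap, List.map_map]
    rfl
  rw [hkeys]
  simp only [convert_population_record_depr_alt]
  apply List.map_congr_left
  intro k _
  simp only [Function.comp_apply]
  rw [hd k, pvFlat_filter k pr hin]
  simp [PySem.Dict.getD, PySem.Dict.get?, pvInner0, List.map_map, Function.comp]

-- ===== VERDICT (by name: the statement is the Claim_ definition above) =====
theorem convert_population_record_depr_spec : Claim_equal_convert_population_record_depr := by
  intro pr _ hpre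
  exact pvMain pr hpre.1 hpre.2
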